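-- pv_equiv track=rewrite | github.com/elsenorbw/electronics | KS3014/code/simple/11-4-digit-7-segment.py | chop_int
-- ===== SOURCE A (Python) =====
-- def chop_int(i):
--     result = []
--
--     while i >= 10:
--         result.append(i % 10)
--         i //= 10
--     result.append(i)
--
--     # padding
--     while len(result) < 4:
--         result.append(0)
--
--     return list(reversed(result))
-- ===== SOURCE B (Python) =====
-- def chop_int(i):
--     # recursive most-significant-first digit split, then pad at the front; no reversal
--     def digits(n):
--         if n < 10:
--             return [n]
--         return digits(n // 10) + [n % 10]
--
--     result = digits(i)
--     return [0] * (4 - len(result)) + result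
-- ===== Notes on version B (the rewrite author's own statement) =====
-- stated objective: simpler
-- what changed: Replaces A's two append-loops plus final reversal with a recursive most-significant-first digit split and a single front-pad, so no list reversal is needed.
import Mathlib
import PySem

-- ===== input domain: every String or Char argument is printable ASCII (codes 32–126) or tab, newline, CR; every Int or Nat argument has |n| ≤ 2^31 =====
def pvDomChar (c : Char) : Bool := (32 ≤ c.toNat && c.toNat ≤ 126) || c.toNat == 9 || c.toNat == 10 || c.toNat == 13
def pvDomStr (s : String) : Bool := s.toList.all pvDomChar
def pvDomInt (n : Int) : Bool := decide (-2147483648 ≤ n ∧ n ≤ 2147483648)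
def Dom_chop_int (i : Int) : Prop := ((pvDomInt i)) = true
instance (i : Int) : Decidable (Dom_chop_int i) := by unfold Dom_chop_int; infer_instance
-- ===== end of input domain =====

-- B recomputes A's result by a recursive most-significant-first digit split with front padding,
-- avoiding A's final reversal; same cost, simpler structure.

-- ===== PORT A =====
-- the first while loop of A: append i % 10 and floor-divide i by 10 while i >= 10, then append i
def chopLoopA (i : Int) (result : List Int) : List Int :=
  if _h : i ≥ 10 then
    chopLoopA (PySem.Int.floordiv i 10) (result ++ [PySem.Int.mod i 10])
  else
    result ++ [i]
termination_by i.toNat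
decreasing_by
  rw [PySem.Int.floordiv_eq_ediv_of_pos (by omega)]
  omega

-- the padding loop of A: append 0 while len(result) < 4
def padLoopA (result : List Int) : List Int :=
  if result.length < 4 then padLoopA (result ++ [0]) else result
termination_by 4 - result.length
decreasing_by simp; omega

def chop_int (i : Int) : List Int :=
  (padLoopA (chopLoopA i [])).reverse

-- ===== PORT B =====
def digitsB (n : Int) : List Int :=
  if _h : n < 10 then [n]
  else digitsB (PySem.Int.floordiv n 10) ++ [PySem.Int.mod n 10]
termination_by n.toNat
decreasing_by
  rw [PySem.Int.floordiv_eq_ediv_of_pos (by omega)]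
  omega

def chop_int_alt (i : Int) : List Int :=
  let result := digitsB i
  List.replicate (4 - result.length) 0 ++ result

-- ===== PRECONDITION & SPEC =====
def Spec_chop_int (i : Int) (out : List Int) : Prop := out = chop_int_alt i
instance (i : Int) (out : List Int) : Decidable (Spec_chop_int i out) := by unfold Spec_chop_int; infer_instance

-- ===== CLAIM (what is proved, stated in full; the proofs are below) =====
def Claim_equal_chop_int : Prop := ∀ (i : Int), Dom_chop_int i → Spec_chop_int i (chop_int i)

-- ===== LEMMAS AND PROOFS =====

theorem chopLoopA_eq (i : Int) (res : List Int) :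
    chopLoopA i res = res ++ (digitsB i).reverse := by
  fun_induction chopLoopA i res with
  | case1 i res h ih =>
    rw [ih]
    conv_rhs => rw [digitsB]
    have hlt : ¬ i < 10 := by omega
    rw [dif_neg hlt]
    simp
  | case2 i res h =>
    rw [digitsB]
    have : i < 10 := by omega
    simp [this]

theorem padLoopA_eq (l : List Int) :
    padLoopA l = l ++ List.replicate (4 - l.length) 0 := by
  fun_induction padLoopA l with
  | case1 l h ih =>
    rw [ih]
    have : 4 - l.length = (4 - (l.length + 1)) + 1 := by omega
    simp [this, List.replicate_succ]
  | case2 l h =>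
    have h0 : 4 - l.length = 0 := by omega
    simp [h0]

-- ===== VERDICT (by name: the statement is the Claim_ definition above) =====
theorem chop_int_spec : Claim_equal_chop_int := by
  intro i _
  unfold Spec_chop_int chop_int chop_int_alt
  rw [chopLoopA_eq, padLoopA_eq]
  simp [List.reverse_replicate]
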